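-- pv_equiv track=rewrite | github.com/alex35469/Traffic-Analysis-on-wearables | Attack/single_action_helper.py | discard_actions
-- ===== SOURCE A (Python) =====
-- def discard_actions(source_files, to_discard):
--     sf_new = []
--     for f in source_files:
--         _in = False
--         for df in to_discard:
--             if df in f:
--                 _in = True
--         if not _in:
--             sf_new.append(f)
--     return sf_new
-- ===== SOURCE B (Python) =====
-- def discard_actions(source_files, to_discard):
--     files = list(source_files)
--     for df in to_discard:
--         files = [f for f in files if df not in f]
--     return files
-- ===== Notes on version B (the rewrite author's own statement) =====
-- stated objective: alternative
-- what changed: Inverted the loop nesting: instead of scanning all patterns per file with a boolean flag, B repeatedly narrows the file list with one list-comprehension filter per discard pattern.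
import Mathlib
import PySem

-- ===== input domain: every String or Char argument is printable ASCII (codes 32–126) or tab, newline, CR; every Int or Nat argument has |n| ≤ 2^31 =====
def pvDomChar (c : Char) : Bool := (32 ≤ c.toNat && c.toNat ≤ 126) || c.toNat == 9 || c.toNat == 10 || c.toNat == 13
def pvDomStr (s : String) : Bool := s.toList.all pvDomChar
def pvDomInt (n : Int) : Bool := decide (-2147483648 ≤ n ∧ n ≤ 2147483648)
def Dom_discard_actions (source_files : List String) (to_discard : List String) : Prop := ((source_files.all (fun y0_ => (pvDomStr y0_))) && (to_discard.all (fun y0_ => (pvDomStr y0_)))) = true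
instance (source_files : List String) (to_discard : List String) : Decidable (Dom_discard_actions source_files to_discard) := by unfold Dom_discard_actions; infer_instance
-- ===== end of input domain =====

-- B inverts the loop nesting (filter the file list once per pattern instead of a per-file flag over all patterns); alternative decomposition, same cost.

-- ===== PORT A =====
def discard_actions (source_files : List String) (to_discard : List String) : List String :=
  source_files.foldl (fun sf_new f =>
    let _in := to_discard.foldl (fun b df => if PySem.Str.isIn df f then true else b) false
    if !_in then sf_new ++ [f] else sf_new) []

-- ===== PORT B =====
def discard_actions_alt (source_files : List String) (to_discard : List String) : List String :=
  to_discard.foldl (fun files df => files.filter (fun f => !PySem.Str.isIn df f)) source_files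

-- ===== PRECONDITION & SPEC =====
def Spec_discard_actions (source_files : List String) (to_discard : List String) (out : List String) : Prop := out = discard_actions_alt source_files to_discard
instance (source_files : List String) (to_discard : List String) (out : List String) : Decidable (Spec_discard_actions source_files to_discard out) := by unfold Spec_discard_actions; infer_instance

-- ===== CLAIM (what is proved, stated in full; the proofs are below) =====
def Claim_equal_discard_actions : Prop := ∀ (source_files : List String) (to_discard : List String), Dom_discard_actions source_files to_discard → Spec_discard_actions source_files to_discard (discard_actions source_files to_discard)

-- ===== LEMMAS AND PROOFS =====

-- the inner flag loop of A computes "some pattern occurs in f"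
theorem pv_inner_any (td : List String) (f : String) (b : Bool) :
    td.foldl (fun b df => if PySem.Str.isIn df f then true else b) b
      = (b || td.any (fun df => PySem.Str.isIn df f)) := by
  induction td generalizing b with
  | nil => simp
  | cons d rest ih =>
    simp only [List.foldl_cons, List.any_cons, ih]
    simp [Bool.or_assoc, Bool.or_comm]

theorem pv_A_eq_filter (sf td : List String) :
    discard_actions sf td = sf.filter (fun f => !td.any (fun df => PySem.Str.isIn df f)) := by
  unfold discard_actions
  simp only [pv_inner_any, Bool.false_or]
  exact (PySem.List.foldl_append_if_eq_filter
    (fun f => !td.any (fun df => PySem.Str.isIn df f)) sf []).trans (List.nil_append _)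

theorem pv_B_eq_filter (td sf : List String) :
    discard_actions_alt sf td = sf.filter (fun f => !td.any (fun df => PySem.Str.isIn df f)) := by
  induction td generalizing sf with
  | nil => simp [discard_actions_alt]
  | cons d rest ih =>
    simp only [discard_actions_alt, List.foldl_cons] at *
    rw [ih]
    rw [List.filter_filter]
    apply List.filter_congr
    intro x _
    simp [Bool.and_comm]

-- ===== VERDICT (by name: the statement is the Claim_ definition above) =====
theorem discard_actions_spec : Claim_equal_discard_actions := by
  intro sf td _
  unfold Spec_discard_actions
  rw [pv_A_eq_filter, pv_B_eq_filter]
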